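-- pv_equiv track=rewrite | github.com/Shivesh777/First-Year | CSC110/lectures/week06/prep6 copy.py | get_order_quantities
-- ===== SOURCE A (Python) =====
-- def get_order_quantities(table_orders: dict[str, list[str]]) -> dict[str, int]:
--     """Return a mapping from food item to the number of that item ordered.
--
--     In the input dictionary table_orders:
--         - Each key is the name of a person.
--         - Each corresponding value is a list of the food items that person has ordered.
--           Duplicates are allowed!
--
--     In the returned dictionary:
--         - Each key a a food item.
--         - Each corresponding value is the number of times that food item was ordered
--           in table_orders, across all people.
--
--     Use a for loop with a dictionary accumulator, and use mutating operations to update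
--     the accumulator in the loop body.
--
--     >>> orders = {'David': ['Vegetarian stew', 'Poutine', 'Vegetarian stew'],\
--                   'Mario': ['Steak pie', 'Poutine', 'Vegetarian stew'],\
--                   'Jen': ['Steak pie', 'Steak pie']}
--     >>> get_order_quantities(orders) == {'Vegetarian stew': 3, 'Poutine': 2, 'Steak pie': 3}
--     True
--     """
--     items = {}
--     for keys in table_orders:
--         for food in table_orders[keys]:
--             if food not in items:
--                 items.update({food: 1})
--             else:
--                 items.update({food: items[food] + 1})
--     return items
-- ===== SOURCE B (Python) =====
-- def get_order_quantities(table_orders: dict[str, list[str]]) -> dict[str, int]: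
--     """Flatten all orders into one list, then map each food to its count in it."""
--     flat = []
--     for foods in table_orders.values():
--         flat = flat + foods
--     items = {}
--     for food in flat:
--         items[food] = flat.count(food)
--     return items
-- ===== Notes on version B (the rewrite author's own statement) =====
-- stated objective: alternative
-- what changed: Replaces the single-pass dict accumulator (insert-1-or-increment per element, nested in the key loop) with a two-phase flatten-then-count: first all order lists are concatenated, then each food's value is set to flat.count(food).
import Mathlib
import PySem

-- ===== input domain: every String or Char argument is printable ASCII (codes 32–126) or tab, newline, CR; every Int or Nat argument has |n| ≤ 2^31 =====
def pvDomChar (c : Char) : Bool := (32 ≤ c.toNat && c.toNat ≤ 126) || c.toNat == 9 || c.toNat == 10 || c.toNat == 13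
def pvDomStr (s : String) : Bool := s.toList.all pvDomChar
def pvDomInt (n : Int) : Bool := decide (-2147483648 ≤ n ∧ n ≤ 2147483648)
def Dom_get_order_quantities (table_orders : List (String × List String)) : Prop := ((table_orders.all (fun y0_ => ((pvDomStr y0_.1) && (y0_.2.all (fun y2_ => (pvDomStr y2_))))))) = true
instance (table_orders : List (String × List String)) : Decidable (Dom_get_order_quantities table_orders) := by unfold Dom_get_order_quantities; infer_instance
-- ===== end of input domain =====

-- B replaces A's single-pass insert-or-increment dict accumulator by flatten-all-orders then
-- items[food] = flat.count(food); same return value (equivalence proved below), not faster.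

-- ===== PORT A =====
-- 'for keys in table_orders' iterates the dict's keys; 'table_orders[keys]' is the dict lookup
-- (getD with [] is exact: every looked-up key is a key of the dict). 'items[food]' in the else
-- branch is exact as getD 0 since 'food in items' holds there.
def get_order_quantities (table_orders : List (String × List String)) : List (String × Int) :=
  (((PySem.Dict.mk table_orders).keys).foldl (fun items keys =>
      ((PySem.Dict.mk table_orders).getD keys []).foldl (fun items food =>
        if items.contains food = false then
          items.insert food 1
        else
          items.insert food (items.getD food 0 + 1)) items)
    PySem.Dict.empty).items

-- ===== PORT B =====
def get_order_quantities_alt (table_orders : List (String × List String)) : List (String × Int) :=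
  let flat := table_orders.foldl (fun flat p => flat ++ p.2) []
  (flat.foldl (fun items food => items.insert food ((PySem.List.count flat food : Nat) : Int))
    PySem.Dict.empty).items

-- ===== PRECONDITION & SPEC =====
-- A Python dict has unique keys, so an association list with duplicate keys does not represent
-- any input A can receive; Pre_ admits exactly the lists that encode a dict.
def Pre_get_order_quantities (table_orders : List (String × List String)) : Prop :=
  (table_orders.map (·.1)).Nodup
instance (table_orders : List (String × List String)) : Decidable (Pre_get_order_quantities table_orders) := by unfold Pre_get_order_quantities; infer_instance

def pvWitness_get_order_quantities : (List (String × List String)) :=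
  [("David", ["Vegetarian stew", "Poutine", "Vegetarian stew"]),
   ("Mario", ["Steak pie", "Poutine", "Vegetarian stew"]),
   ("Jen", ["Steak pie", "Steak pie"])]

def Spec_get_order_quantities (table_orders : List (String × List String)) (out : List (String × Int)) : Prop := out = get_order_quantities_alt table_orders
instance (table_orders : List (String × List String)) (out : List (String × Int)) : Decidable (Spec_get_order_quantities table_orders out) := by unfold Spec_get_order_quantities; infer_instance

-- ===== CLAIM (what is proved, stated in full; the proofs are below) =====
def Claim_equal_get_order_quantities : Prop := ∀ (table_orders : List (String × List String)), Dom_get_order_quantities table_orders → Pre_get_order_quantities table_orders → Spec_get_order_quantities table_orders (get_order_quantities table_orders)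

-- ===== LEMMAS AND PROOFS =====

-- A's outer loop over the keys, looking each key up, is the loop over the pairs (keys unique).
theorem foldl_keys_lookup_eq_pairs
    (g : PySem.Dict String Int → String → PySem.Dict String Int) :
    ∀ (t : List (String × List String)) (d : PySem.Dict String (List String))
      (init : PySem.Dict String Int),
      (∀ p ∈ t, d.getD p.1 [] = p.2) →
      (t.map (·.1)).foldl (fun it k => (d.getD k []).foldl g it) init
        = t.foldl (fun it p => p.2.foldl g it) init := by
  intro t
  induction t with
  | nil => intro d init _; rfl
  | cons p t ih =>
      intro d init h
      simp only [List.map_cons, List.foldl_cons, h p (by simp)]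
      exact ih d _ (fun q hq => h q (by simp [hq]))

-- folding the inner loop body over each pair's list in turn = folding it over the flat list
theorem foldl_pairs_eq_foldl_flat
    (g : PySem.Dict String Int → String → PySem.Dict String Int) :
    ∀ (t : List (String × List String)) (init : PySem.Dict String Int),
      t.foldl (fun it p => p.2.foldl g it) init
        = (t.flatMap (·.2)).foldl g init := by
  intro t
  induction t with
  | nil => intro init; rfl
  | cons p t ih => intro init; simp only [List.foldl_cons, List.flatMap_cons, List.foldl_append, ih]

-- A's loop body is Counter's insert-increment step
theorem stepA_eq_counter_step :
    (fun (items : PySem.Dict String Int) food =>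
        if items.contains food = false then items.insert food 1
        else items.insert food (items.getD food 0 + 1))
      = (fun (d : PySem.Dict String Int) x => d.insert x (d.getD x 0 + 1)) := by
  funext d x
  by_cases h : d.contains x = false
  · simp [h, PySem.Dict.getD_of_not_contains d 0 h]
  · simp [h]

-- B's loop: inserting a value that depends only on the key maps it over the first occurrences
theorem items_foldl_insert_const (v : String → Int) :
    ∀ (l : List String) (d : PySem.Dict String Int),
      d.keys.Nodup → d.items = d.keys.map (fun k => (k, v k)) →
      (l.foldl (fun d x => d.insert x (v x)) d).items
        = (PySem.Set.update d.keys l).map (fun k => (k, v k)) := by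
  intro l
  induction l with
  | nil => intro d _ hitems; simpa [PySem.Set.update] using hitems
  | cons x l ih =>
      intro d hnd hitems
      rw [List.foldl_cons, PySem.Set.update_cons]
      by_cases hc : d.contains x = true
      · have hkeys : (d.insert x (v x)).keys = d.keys :=
          PySem.Dict.keys_insert_of_contains d (v x) hc
        have hadd : PySem.Set.add d.keys x = d.keys :=
          PySem.Set.add_of_mem ((PySem.Dict.contains_iff_mem_keys d x).mp hc)
        rw [hadd, ih _ (by rw [hkeys]; exact hnd) ?_] <;> rw [hkeys]
        rw [PySem.Dict.items_insert_of_contains d (v x) hc, hitems, List.map_map]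
        refine List.map_congr_left (fun k _ => ?_)
        by_cases hkx : k = x
        · simp [hkx]
        · simp [Function.comp, hkx]
      · have hc' : d.contains x = false := by simpa using hc
        have hkeys : (d.insert x (v x)).keys = d.keys ++ [x] :=
          PySem.Dict.keys_insert_of_not_contains d (v x) hc'
        have hmem : x ∉ d.keys := fun hx =>
          hc ((PySem.Dict.contains_iff_mem_keys d x).mpr hx)
        have hadd : PySem.Set.add d.keys x = d.keys ++ [x] :=
          PySem.Set.add_of_not_mem hmem
        have hnd' : (d.keys ++ [x]).Nodup :=
          hnd.append (List.nodup_singleton x)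
            (fun a ha hb => by simp at hb; subst hb; exact hmem ha)
        rw [hadd, ih _ (by rw [hkeys]; exact hnd') ?_] <;> rw [hkeys]
        rw [PySem.Dict.items_insert_of_not_contains d (v x) hc', hitems, List.map_append]
        simp

-- ===== VERDICT (by name: the statement is the Claim_ definition above) =====
theorem get_order_quantities_spec : Claim_equal_get_order_quantities := by
  intro t _ hpre
  unfold Spec_get_order_quantities get_order_quantities get_order_quantities_alt
  have hkeysmk : (PySem.Dict.mk t).keys = t.map (·.1) := rfl
  have hlook : ∀ p ∈ t, (PySem.Dict.mk t).getD p.1 [] = p.2 := by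
    intro p hp
    exact PySem.Dict.getD_of_mem_items (PySem.Dict.mk t) hp hpre []
  have hflat : t.foldl (fun flat p => flat ++ p.2) [] = t.flatMap (·.2) := by
    simpa using PySem.List.foldl_append_eq_flatMap (·.2) t []
  rw [hkeysmk, foldl_keys_lookup_eq_pairs _ t _ _ hlook, foldl_pairs_eq_foldl_flat,
      stepA_eq_counter_step, PySem.Dict.foldl_insert_getD_add_one_eq_counter,
      PySem.Dict.items_counter, hflat,
      items_foldl_insert_const (fun k => ((PySem.List.count (t.flatMap (·.2)) k : Nat) : Int))
        (t.flatMap (·.2)) PySem.Dict.empty (by simp [PySem.Dict.keys_empty])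
        (by simp [PySem.Dict.keys_empty]; rfl),
      PySem.Dict.keys_empty]
  have hupd : PySem.Set.update ([] : PySem.Set String) (t.flatMap (·.2))
      = PySem.Set.ofList (t.flatMap (·.2)) := PySem.Set.update_empty _
  rw [hupd]
  simp [PySem.List.count_eq]
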